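-- pv_equiv track=rewrite | github.com/AdamZhouSE/pythonHomework | Code/CodeRecords/2506/60788/248623.py | f
-- ===== SOURCE A (Python) =====
-- def f(s):
--     if len(s) == 1:
--         return [s]
--     else:
--         start=s[0]
--         t=f(s[1:])
--         for x in t:
--             if x[0]>start:
--                 x.insert(0,start)
--         return t
-- ===== SOURCE B (Python) =====
-- def f(s):
--     # single right-to-left pass: keep the strictly decreasing "front" sequence,
--     # appending (then one final reverse) instead of recursing on slices.
--     rev = []
--     for x in reversed(s):
--         if not rev or x < rev[-1]:
--             rev.append(x)
--     rev.reverse()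
--     return [rev]
-- ===== Notes on version B (the rewrite author's own statement) =====
-- stated objective: faster
-- what changed: replaces A's slice-based recursion with per-level front insertion by a single right-to-left iterative pass that keeps only the running front sequence, then one reverse
import Mathlib
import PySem

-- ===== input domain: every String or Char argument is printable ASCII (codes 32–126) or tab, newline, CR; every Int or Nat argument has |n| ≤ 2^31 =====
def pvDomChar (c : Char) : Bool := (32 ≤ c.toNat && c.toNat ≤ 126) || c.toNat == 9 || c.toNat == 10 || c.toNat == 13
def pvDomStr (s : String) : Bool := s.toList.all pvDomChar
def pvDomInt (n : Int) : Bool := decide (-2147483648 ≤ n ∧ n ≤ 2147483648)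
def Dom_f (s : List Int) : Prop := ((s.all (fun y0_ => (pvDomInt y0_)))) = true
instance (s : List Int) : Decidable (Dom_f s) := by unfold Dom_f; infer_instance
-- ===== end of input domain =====

-- B replaces A's slice-based recursion (with front insertion at every level) by one
-- right-to-left pass that appends to the kept front sequence and reverses once (faster: O(n) vs O(n^2)).
-- A mutates the inner lists of its recursive result in place; equivalence is about the return value.

-- ===== PORT A =====
def f (s : List Int) : List (List Int) :=
  match s with
  | [] => []        -- Python: s[0] raises IndexError on the empty list; excluded by Pre_f
  | a :: rest =>
    if rest = [] then [[a]]                 -- if len(s) == 1: return [s]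
    else
      -- start = s[0]; t = f(s[1:]); for x in t: if x[0] > start: x.insert(0, start)
      (f rest).map (fun x =>
        match x with
        | [] => []                          -- unreachable: every element of t is nonempty
        | y :: _ => if y > a then a :: x else x)

-- ===== PORT B =====
def f_alt (s : List Int) : List (List Int) :=
  -- rev = []; for x in reversed(s): if not rev or x < rev[-1]: rev.append(x)
  let rev := s.reverse.foldl
    (fun rev x => if rev = [] ∨ x < rev.getLast?.getD 0 then rev ++ [x] else rev) []
  -- rev.reverse(); return [rev]
  [rev.reverse]

-- ===== PRECONDITION & SPEC =====
def Pre_f (s : List Int) : Prop := s ≠ []     -- A raises IndexError on []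
instance (s : List Int) : Decidable (Pre_f s) := by unfold Pre_f; infer_instance
def pvWitness_f : List Int := ([3, 1, 2])

def Spec_f (s : List Int) (out : List (List Int)) : Prop := out = f_alt s
instance (s : List Int) (out : List (List Int)) : Decidable (Spec_f s out) := by unfold Spec_f; infer_instance

-- ===== CLAIM (what is proved, stated in full; the proofs are below) =====
def Claim_equal_f : Prop := ∀ (s : List Int), Dom_f s → Pre_f s → Spec_f s (f s)

-- ===== LEMMAS AND PROOFS =====

-- the single "front" sequence both programs compute (proof-only helper)
def gFront : List Int → List Int
  | [] => []
  | a :: rest =>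
    if rest = [] then [a]
    else if (gFront rest).head?.getD 0 > a then a :: gFront rest else gFront rest

theorem gFront_ne_nil (s : List Int) (h : s ≠ []) : gFront s ≠ [] := by
  match s with
  | a :: rest =>
    unfold gFront
    split
    · simp
    · split <;> simp_all [gFront_ne_nil rest]

theorem f_eq_gFront (s : List Int) (h : s ≠ []) : f s = [gFront s] := by
  match s with
  | a :: rest =>
    unfold f gFront
    by_cases hr : rest = []
    · simp [hr]
    · rw [if_neg hr, if_neg hr, f_eq_gFront rest hr]
      obtain ⟨y, ys, hy⟩ := List.exists_cons_of_ne_nil (gFront_ne_nil rest hr)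
      simp only [hy, List.map]
      by_cases hgt : y > a <;> simp [hgt]

theorem gFront_cons (a : Int) (rest : List Int) (hr : rest ≠ []) :
    gFront (a :: rest) =
      if (gFront rest).head?.getD 0 > a then a :: gFront rest else gFront rest := by
  conv_lhs => rw [gFront]
  rw [if_neg hr]

theorem foldl_eq_gFront_reverse (s : List Int) :
    s.reverse.foldl
      (fun rev x => if rev = [] ∨ x < rev.getLast?.getD 0 then rev ++ [x] else rev) []
    = (gFront s).reverse := by
  match s with
  | [] => simp [gFront]
  | a :: rest =>
    have ih := foldl_eq_gFront_reverse rest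
    simp only [List.reverse_cons, List.foldl_append, ih, List.foldl]
    by_cases hr : rest = []
    · simp [hr, gFront]
    · have hne : gFront rest ≠ [] := gFront_ne_nil rest hr
      have hrevne : (gFront rest).reverse ≠ [] := by simpa using hne
      rw [gFront_cons a rest hr]
      have hlast : (gFront rest).reverse.getLast?.getD 0 = (gFront rest).head?.getD 0 := by
        rw [List.getLast?_reverse]
      by_cases hlt : a < (gFront rest).head?.getD 0
      · rw [if_pos (Or.inr (by rw [hlast]; exact hlt)), if_pos hlt]
        simp
      · rw [if_neg (by rw [hlast]; exact fun h => h.elim hrevne hlt), if_neg hlt]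

-- ===== VERDICT (by name: the statement is the Claim_ definition above) =====
theorem f_spec : Claim_equal_f := by
  intro s _ hpre
  unfold Spec_f f_alt
  rw [f_eq_gFront s hpre, foldl_eq_gFront_reverse s]
  simp
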